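-- pv_equiv track=rewrite | github.com/vlzhr/WavesDAO | dao_deploy.py | set_membership_address
-- ===== SOURCE A (Python) =====
-- def set_membership_address(script_text, address):
--     li = script_text.split("\n")
--     new_li = []
--     set_address_line = 'let mainContract = addressFromStringValue("' + \
--         address+'") # HERE TO SET MEMBERSHIP SMART CONTRACT ADDRESS'
--
--     for line in li:
--         if not "# HERE TO SET MEMBERSHIP SMART CONTRACT ADDRESS" in line:
--             new_li.append(line)
--         else:
--             new_li.append(set_address_line)
--
--     return ("\n").join(new_li)
-- ===== SOURCE B (Python) =====
-- MARKER = "# HERE TO SET MEMBERSHIP SMART CONTRACT ADDRESS"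
--
--
-- def set_membership_address(script_text, address):
--     # Recursive decomposition: peel one line off with partition("\n") and
--     # splice the rest, instead of materialising a list of all lines.
--     repl = 'let mainContract = addressFromStringValue("' + address + '") ' + MARKER
--     head, sep, tail = script_text.partition("\n")
--     fixed = repl if MARKER in head else head
--     if not sep:
--         return fixed
--     return fixed + "\n" + set_membership_address(tail, address)
-- ===== Notes on version B (the rewrite author's own statement) =====
-- stated objective: alternative
-- what changed: Replaces split-into-list / per-line loop / join with a recursive partition('\n') decomposition that fixes the first line and splices the recursively processed remainder, never materialising a list of lines.
import Mathlib
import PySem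

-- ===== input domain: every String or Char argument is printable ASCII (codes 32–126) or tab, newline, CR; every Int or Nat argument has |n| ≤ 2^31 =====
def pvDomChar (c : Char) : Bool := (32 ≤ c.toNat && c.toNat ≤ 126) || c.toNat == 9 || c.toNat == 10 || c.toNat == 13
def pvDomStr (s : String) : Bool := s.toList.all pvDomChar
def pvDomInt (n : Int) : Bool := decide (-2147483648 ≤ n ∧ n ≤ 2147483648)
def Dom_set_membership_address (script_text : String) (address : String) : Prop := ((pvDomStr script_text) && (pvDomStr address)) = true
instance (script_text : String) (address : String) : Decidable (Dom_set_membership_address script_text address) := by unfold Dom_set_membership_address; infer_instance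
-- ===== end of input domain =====

-- B replaces A's split-into-list / per-line loop / join with a recursive
-- partition("\n") decomposition (alternative structure, same observable result).


-- the marker literal, as a char list (string functions are ported on the List Char side)
def pvMark : List Char := "# HERE TO SET MEMBERSHIP SMART CONTRACT ADDRESS".toList

-- ===== PORT A =====
-- literal transliteration of A: split on "\n", rebuild the line list with a loop, join
def set_membership_address (script_text : String) (address : String) : String :=
  let li := PySem.Chars.splitOn script_text.toList ['\n']
  let set_address_line :=
    "let mainContract = addressFromStringValue(\"".toList ++ address.toList ++
      "\") # HERE TO SET MEMBERSHIP SMART CONTRACT ADDRESS".toList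
  let new_li := li.foldl
    (fun acc line =>
      if !(PySem.Chars.isIn pvMark line) then acc ++ [line] else acc ++ [set_address_line])
    []
  String.ofList (PySem.Chars.join ['\n'] new_li)

-- ===== PORT B =====
-- head, sep, tail = s.partition("\n")  (hand port, exact: single-char separator)
def pvPartitionNl : List Char → List Char × Bool × List Char
  | [] => ([], false, [])
  | c :: rest =>
    if c = '\n' then ([], true, rest)
    else
      let r := pvPartitionNl rest
      (c :: r.1, r.2.1, r.2.2)

theorem pvPartitionNl_tail_le (cs : List Char) : (pvPartitionNl cs).2.2.length ≤ cs.length := by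
  induction cs with
  | nil => simp [pvPartitionNl]
  | cons c rest ih =>
    simp only [pvPartitionNl]
    split
    · simp
    · simp only [List.length_cons]; omega

theorem pvPartitionNl_tail_lt (cs : List Char) (h : (pvPartitionNl cs).2.1 = true) :
    (pvPartitionNl cs).2.2.length < cs.length := by
  cases cs with
  | nil => simp [pvPartitionNl] at h
  | cons c rest =>
    have hle := pvPartitionNl_tail_le rest
    by_cases hc : c = '\n'
    · simp only [pvPartitionNl, if_pos hc, List.length_cons]; omega
    · simp only [pvPartitionNl, if_neg hc, List.length_cons]; omega

-- recursive decomposition: fix the first line, splice the processed remainder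
def pvAltGo (repl : List Char) (cs : List Char) : List Char :=
  let p := pvPartitionNl cs
  let fixed := if PySem.Chars.isIn pvMark p.1 then repl else p.1
  if p.2.1 then fixed ++ '\n' :: pvAltGo repl p.2.2 else fixed
termination_by cs.length
decreasing_by
  rename_i hp
  exact pvPartitionNl_tail_lt cs hp

def set_membership_address_alt (script_text : String) (address : String) : String :=
  let repl :=
    "let mainContract = addressFromStringValue(\"".toList ++ address.toList ++
      "\") ".toList ++ pvMark
  String.ofList (pvAltGo repl script_text.toList)

-- ===== PRECONDITION & SPEC =====
def Spec_set_membership_address (script_text : String) (address : String) (out : String) : Prop := out = set_membership_address_alt script_text address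
instance (script_text : String) (address : String) (out : String) : Decidable (Spec_set_membership_address script_text address out) := by unfold Spec_set_membership_address; infer_instance

-- ===== CLAIM (what is proved, stated in full; the proofs are below) =====
def Claim_equal_set_membership_address : Prop := ∀ (script_text : String) (address : String), Dom_set_membership_address script_text address → Spec_set_membership_address script_text address (set_membership_address script_text address)

-- ===== LEMMAS AND PROOFS =====

-- structural form of splitOn on the single-char separator '\n'
def pvSplitNl : List Char → List Char → List (List Char)
  | [], cur => [cur.reverse]
  | c :: r, cur => if c = '\n' then cur.reverse :: pvSplitNl r [] else pvSplitNl r (c :: cur)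

theorem pvSplitOn_go_eq (fuel : Nat) (l cur : List Char) (acc : List (List Char))
    (h : l.length < fuel) :
    PySem.Chars.splitOn.go ['\n'] fuel l cur acc = acc.reverse ++ pvSplitNl l cur := by
  induction fuel generalizing l cur acc with
  | zero => omega
  | succ fuel ih =>
    cases l with
    | nil => simp [PySem.Chars.splitOn.go, pvSplitNl]
    | cons c rest =>
      rw [PySem.Chars.splitOn.go.eq_def]
      simp only [List.isPrefixOf, List.length_cons] at *
      by_cases hc : c = '\n'
      · subst hc
        rw [if_pos (by simp)]
        simp only [List.length_nil, List.drop_zero, List.drop_succ_cons]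
        rw [ih rest [] (cur.reverse :: acc) (by omega)]
        simp [pvSplitNl]
      · rw [if_neg (by simp [BEq.beq]; intro h; exact hc h.symm)]
        rw [ih rest (c :: cur) acc (by omega)]
        simp [pvSplitNl, hc]

theorem pvSplitOn_eq (cs : List Char) :
    PySem.Chars.splitOn cs ['\n'] = pvSplitNl cs [] := by
  have : PySem.Chars.splitOn cs ['\n'] = PySem.Chars.splitOn.go ['\n'] (cs.length + 1) cs [] [] := rfl
  rw [this, pvSplitOn_go_eq _ _ _ _ (by omega)]
  simp

theorem pvSplitNl_partition (cs : List Char) : ∀ cur,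
    pvSplitNl cs cur =
      (cur.reverse ++ (pvPartitionNl cs).1) ::
        (if (pvPartitionNl cs).2.1 then pvSplitNl (pvPartitionNl cs).2.2 [] else []) := by
  induction cs with
  | nil => intro cur; simp [pvSplitNl, pvPartitionNl]
  | cons c rest ih =>
    intro cur
    by_cases hc : c = '\n'
    · subst hc; simp [pvSplitNl, pvPartitionNl]
    · simp only [pvSplitNl, pvPartitionNl, if_neg hc]
      rw [ih (c :: cur)]
      simp

theorem pvAltGo_eq_join (repl : List Char) (cs : List Char) :
    pvAltGo repl cs =
      PySem.Chars.join ['\n']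
        ((pvSplitNl cs []).map (fun line => if PySem.Chars.isIn pvMark line then repl else line)) := by
  rw [pvAltGo]
  rw [pvSplitNl_partition cs []]
  by_cases hs : (pvPartitionNl cs).2.1
  · rw [if_pos hs, if_pos hs]
    rw [pvAltGo_eq_join repl (pvPartitionNl cs).2.2]
    rw [pvSplitNl_partition (pvPartitionNl cs).2.2 []]
    simp [PySem.Chars.join, List.intercalate]
  · rw [if_neg hs, if_neg hs]
    simp [PySem.Chars.join, List.intercalate]
termination_by cs.length
decreasing_by
  exact pvPartitionNl_tail_lt cs hs

theorem pvSuffix_eq :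
    "\") # HERE TO SET MEMBERSHIP SMART CONTRACT ADDRESS".toList = "\") ".toList ++ pvMark := by
  decide

-- ===== VERDICT (by name: the statement is the Claim_ definition above) =====
theorem set_membership_address_spec : Claim_equal_set_membership_address := by
  intro script_text address _
  unfold Spec_set_membership_address set_membership_address set_membership_address_alt
  simp only [pvSplitOn_eq, pvAltGo_eq_join]
  congr 1
  rw [pvSuffix_eq]
  congr 1
  rw [show (fun (acc : List (List Char)) (line : List Char) =>
        if !(PySem.Chars.isIn pvMark line) then acc ++ [line]
        else acc ++ ["let mainContract = addressFromStringValue(\"".toList ++ address.toList ++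
          ("\") ".toList ++ pvMark)])
      = (fun acc line => acc ++ [if PySem.Chars.isIn pvMark line then
          "let mainContract = addressFromStringValue(\"".toList ++ address.toList ++
            ("\") ".toList ++ pvMark) else line]) from by
    funext acc line; by_cases h : PySem.Chars.isIn pvMark line <;> simp [h]]
  rw [PySem.List.foldl_append_singleton_eq_map]
  simp
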